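-- pv_equiv track=rewrite | github.com/esromerog/MindHue | mindhue.py | arriba
-- ===== SOURCE A (Python) =====
-- def arriba (tab):
--     movimiento = 0
--     for a in range(len(tab)):
--         sumas = []
--         for e in range (len(tab)-1):
--             for i in range (1, len(tab)):
--                 if tab[i][a] != 0 and tab[i-1][a]==0:
--                     tab[i-1][a] = tab[i][a]
--                     tab[i][a] = 0
--                     movimiento+=1
--                 elif tab[i][a] != 0 and tab[i][a] == tab[i-1][a] and i not in sumas and i+1 not in sumas:
--                     tab[i-1][a] *=2
--                     tab[i][a]=0
--                     sumas.append(i)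
--                     movimiento+=1
--     return movimiento
-- ===== SOURCE B (Python) =====
-- def arriba(tab):
--     # One O(n) compress-merge scan per column (A does n-1 bubble passes per column).
--     # Counter = sum of per-tile single-step displacements plus one per merge,
--     # which is exactly what A's elementary operations add up to.
--     # Note: unlike A, this does not mutate tab; equivalence is about the return value.
--     n = len(tab)
--     total = 0
--     for a in range(n):
--         k = 0           # tiles already placed in this column
--         last = 0        # value of the last placed tile
--         merged = False  # whether the last placed tile is a merge result
--         for i in range(n):
--             v = tab[i][a]
--             if v == 0:
--                 continue
--             if k > 0 and v == last and not merged: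
--                 total += (i - k) + 1
--                 last = 2 * v
--                 merged = True
--             else:
--                 total += i - k
--                 last = v
--                 merged = False
--                 k += 1
--     return total
-- ===== Notes on version B (the rewrite author's own statement) =====
-- stated objective: faster
-- what changed: Replaces A's n-1 repeated bubble passes per column (each an O(n) scan over the column, O(n^3) total) by a single compress-merge scan per column that adds up each tile's displacement plus one per merge.
-- outside the precondition, e.g. on arriba([[]]): A returns 0, B raises IndexError
import Mathlib
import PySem

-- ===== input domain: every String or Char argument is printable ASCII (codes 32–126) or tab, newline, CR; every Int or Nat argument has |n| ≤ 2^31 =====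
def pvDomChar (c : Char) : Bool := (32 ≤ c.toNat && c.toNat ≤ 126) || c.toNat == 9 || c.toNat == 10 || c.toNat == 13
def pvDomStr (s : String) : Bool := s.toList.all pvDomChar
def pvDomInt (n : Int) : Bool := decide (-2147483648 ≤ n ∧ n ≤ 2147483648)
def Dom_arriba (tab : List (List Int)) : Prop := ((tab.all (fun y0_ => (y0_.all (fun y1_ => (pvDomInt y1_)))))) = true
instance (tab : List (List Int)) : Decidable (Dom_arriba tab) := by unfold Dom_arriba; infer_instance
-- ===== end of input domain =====

-- B replaces A's n-1 bubble passes per column by one compress-merge scan per column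
-- (sum of per-tile displacements plus one per merge); equivalence is about the RETURN
-- value only: the Python A mutates tab in place, B does not.

-- ===== PORT A =====
def pyCell (tab : List (List Int)) (i a : Nat) : Int := (tab.getD i []).getD a 0
def pySet (tab : List (List Int)) (i a : Nat) (v : Int) : List (List Int) :=
  tab.modify i (fun r => r.set a v)

def stepA (a : Nat) (s : List (List Int) × List Nat × Int) (i : Nat) :
    List (List Int) × List Nat × Int :=
  if pyCell s.1 i a ≠ 0 ∧ pyCell s.1 (i-1) a = 0 then
    (pySet (pySet s.1 (i-1) a (pyCell s.1 i a)) i a 0, s.2.1, s.2.2 + 1)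
  else if pyCell s.1 i a ≠ 0 ∧ pyCell s.1 i a = pyCell s.1 (i-1) a ∧ i ∉ s.2.1 ∧ i+1 ∉ s.2.1 then
    (pySet (pySet s.1 (i-1) a (pyCell s.1 (i-1) a * 2)) i a 0, s.2.1 ++ [i], s.2.2 + 1)
  else s

def arriba (tab : List (List Int)) : Int :=
  ((List.range tab.length).foldl (fun (s : List (List Int) × Int) a =>
    let r := (List.range (tab.length - 1)).foldl
      (fun s2 _ => (List.range' 1 (tab.length - 1)).foldl (stepA a) s2)
      (s.1, ([] : List Nat), s.2)
    (r.1, r.2.2)) (tab, 0)).2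

-- ===== PORT B =====
def altColStep (tab : List (List Int)) (a : Nat) (st : Nat × Int × Bool × Int) (i : Nat) :
    Nat × Int × Bool × Int :=
  let v := (tab.getD i []).getD a 0
  if v = 0 then st
  else if 0 < st.1 ∧ v = st.2.1 ∧ st.2.2.1 = false then
    (st.1, 2*v, true, st.2.2.2 + ((i:Int) - (st.1:Int)) + 1)
  else (st.1 + 1, v, false, st.2.2.2 + ((i:Int) - (st.1:Int)))

def arriba_alt (tab : List (List Int)) : Int :=
  (List.range tab.length).foldl (fun tot a =>
    tot + ((List.range tab.length).foldl (altColStep tab a) (0, 0, false, 0)).2.2.2) 0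

-- ===== PRECONDITION & SPEC =====
-- Pre_arriba excludes grids with a row shorter than len(tab): on those A raises
-- IndexError whenever len(tab) >= 2 (it indexes tab[i][a] for all i, a < len(tab)),
-- and on the degenerate len(tab) = 1 short-row grids (e.g. [[]]) A returns 0 only
-- because its loops are empty while B's own column scan raises there.
def Pre_arriba (tab : List (List Int)) : Prop := ∀ r ∈ tab, tab.length ≤ r.length
instance (tab : List (List Int)) : Decidable (Pre_arriba tab) := by
  unfold Pre_arriba; infer_instance

def pvWitness_arriba : List (List Int) := [[2, 2], [2, 0]]

def Spec_arriba (tab : List (List Int)) (out : Int) : Prop := out = arriba_alt tab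
instance (tab : List (List Int)) (out : Int) : Decidable (Spec_arriba tab out) := by
  unfold Spec_arriba; infer_instance

-- ===== CLAIM (what is proved, stated in full; the proofs are below) =====
def Claim_equal_arriba : Prop :=
  ∀ (tab : List (List Int)), Dom_arriba tab → Pre_arriba tab → Spec_arriba tab (arriba tab)

-- ===== LEMMAS AND PROOFS =====
-- column cell access
def cget (c : List Int) (j : Nat) : Int := c.getD j 0

-- A's step on a single column (mirror of stepA through the column projection)
def stepc (s : List Int × List Nat × Int) (i : Nat) : List Int × List Nat × Int :=
  if cget s.1 i ≠ 0 ∧ cget s.1 (i-1) = 0 then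
    ((s.1.set (i-1) (cget s.1 i)).set i 0, s.2.1, s.2.2 + 1)
  else if cget s.1 i ≠ 0 ∧ cget s.1 i = cget s.1 (i-1) ∧ i ∉ s.2.1 ∧ i+1 ∉ s.2.1 then
    ((s.1.set (i-1) (cget s.1 (i-1) * 2)).set i 0, s.2.1 ++ [i], s.2.2 + 1)
  else s

def passc (n : Nat) (s : List Int × List Nat × Int) : List Int × List Nat × Int :=
  (List.range' 1 (n-1)).foldl stepc s

-- the scan computing per-cell remaining-work w
def scanStep (sumas : List Nat) (j : Nat) (st : Nat × Int × Bool) (v : Int) :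
    (Nat × Int × Bool) × Int :=
  if v = 0 then (st, 0)
  else if 0 < st.1 ∧ v = st.2.1 ∧ st.2.2 = false ∧ (j+1) ∉ sumas then
    ((st.1, 2*v, true), ((j:Int) - (st.1:Int)) + 1)
  else ((st.1 + 1, v, decide ((j+1) ∈ sumas)), (j:Int) - (st.1:Int))

def wl (sumas : List Nat) : List Int → Nat → (Nat × Int × Bool) → List Int
  | [], _, _ => []
  | v :: t, j, st => (scanStep sumas j st v).2 :: wl sumas t (j+1) (scanStep sumas j st v).1

def scanFold (sumas : List Nat) : List Int → Nat → (Nat × Int × Bool) → (Nat × Int × Bool)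
  | [], _, st => st
  | v :: t, j, st => scanFold sumas t (j+1) (scanStep sumas j st v).1

def Rc (c : List Int) (sumas : List Nat) : Int := (wl sumas c 0 (0,0,false)).sum
def wle (c : List Int) (sumas : List Nat) (j : Nat) : Int := (wl sumas c 0 (0,0,false)).getD j 0

-- invariants
def mergecond (c : List Int) (sumas : List Nat) (i : Nat) : Prop :=
  cget c i ≠ 0 ∧ cget c i = cget c (i-1) ∧ i ∉ sumas ∧ i+1 ∉ sumas

def SInv (c : List Int) (sumas : List Nat) : Prop := ∀ s ∈ sumas, ∀ l < s, cget c l ≠ 0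
def FInv (c : List Int) (sumas : List Nat) : Prop :=
  ∀ s ∈ sumas, ∀ l, 1 ≤ l → l < s → ¬ mergecond c sumas l
def KInv (c : List Int) (sumas : List Nat) (i : Nat) : Prop :=
  cget c (i-1) ≠ 0 → (∀ l < i, cget c l ≠ 0) ∧ (∀ l, 1 ≤ l → l < i → ¬ mergecond c sumas l)

-- basic wl facts
theorem wl_length (sumas : List Nat) (c : List Int) (j : Nat) (st : Nat × Int × Bool) :
    (wl sumas c j st).length = c.length := by
  induction c generalizing j st with
  | nil => rfl
  | cons v t ih => simp [wl, ih]

theorem wl_append (sumas : List Nat) (c₁ c₂ : List Int) (j : Nat) (st : Nat × Int × Bool) :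
    wl sumas (c₁ ++ c₂) j st =
      wl sumas c₁ j st ++ wl sumas c₂ (j + c₁.length) (scanFold sumas c₁ j st) := by
  induction c₁ generalizing j st with
  | nil => simp [wl, scanFold]
  | cons v t ih =>
      simp only [List.cons_append, wl, scanFold, ih, List.length_cons]
      have : j + 1 + t.length = j + (t.length + 1) := by omega
      rw [this]

theorem scanFold_k_le (sumas : List Nat) (c : List Int) (j : Nat) (st : Nat × Int × Bool) :
    (scanFold sumas c j st).1 ≤ st.1 + c.length := by
  induction c generalizing j st with
  | nil => simp [scanFold]
  | cons v t ih =>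
      refine le_trans (ih _ _) ?_
      simp only [scanStep, List.length_cons]
      split_ifs <;> simp <;> omega

theorem wl_nonneg (sumas : List Nat) (c : List Int) (j : Nat) (st : Nat × Int × Bool)
    (h : st.1 ≤ j) : ∀ w ∈ wl sumas c j st, 0 ≤ w := by
  induction c generalizing j st with
  | nil => simp [wl]
  | cons v t ih =>
      intro w hw
      simp only [wl, List.mem_cons] at hw
      rcases hw with hw | hw
      · subst hw
        simp only [scanStep]
        split_ifs with h1 h2
        · simp
        · have : st.1 ≤ j := h
          simp only []
          omega
        · omega
      · refine ih _ _ ?_ _ hw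
        simp only [scanStep]
        split_ifs <;> simp <;> omega

theorem scanFold_append (sumas : List Nat) (c₁ c₂ : List Int) (j : Nat) (st : Nat × Int × Bool) :
    scanFold sumas (c₁ ++ c₂) j st = scanFold sumas c₂ (j + c₁.length) (scanFold sumas c₁ j st) := by
  induction c₁ generalizing j st with
  | nil => simp [scanFold]
  | cons v t ih =>
      simp only [List.cons_append, scanFold, ih, List.length_cons]
      have : j + 1 + t.length = j + (t.length + 1) := by omega
      rw [this]

theorem wl_congr_sumas (s1 s2 : List Nat) (c : List Int) (j : Nat) (st : Nat × Int × Bool)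
    (h : ∀ x, j + 1 ≤ x → (x ∈ s1 ↔ x ∈ s2)) : wl s1 c j st = wl s2 c j st := by
  induction c generalizing j st with
  | nil => rfl
  | cons v t ih =>
      have hst : scanStep s1 j st v = scanStep s2 j st v := by
        simp only [scanStep]
        have h1 : ((j+1) ∈ s1) = ((j+1) ∈ s2) := by
          have := h (j+1) (le_refl _); simp [this]
        split_ifs with a1 a2 a3 a4 a5 <;>
          simp_all [h (j+1) (le_refl _)]
      simp only [wl, hst]
      rw [ih (j+1) (scanStep s2 j st v).1 (fun x hx => h x (by omega))]

theorem take_succ_of_lt {α : Type} [Inhabited α] (c : List α) (m : Nat) (h : m < c.length) :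
    c.take (m+1) = c.take m ++ [c.getD m default] := by
  rw [List.take_succ]
  congr 1
  rw [List.getD_eq_getElem?_getD]
  simp [List.getElem?_eq_getElem h]

theorem wl_getD_eq (sumas : List Nat) (c : List Int) (st : Nat × Int × Bool) (j : Nat)
    (h : j < c.length) :
    (wl sumas c 0 st).getD j 0 =
      (scanStep sumas j (scanFold sumas (c.take j) 0 st) (cget c j)).2 := by
  have key : ∀ (t : List Int) (j0 : Nat) (st : Nat × Int × Bool) (j : Nat), j < t.length →
      (wl sumas t j0 st).getD j 0 =
        (scanStep sumas (j0 + j) (scanFold sumas (t.take j) j0 st) (cget t j)).2 := by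
    intro t
    induction t with
    | nil => intro _ _ j hj; simp at hj
    | cons v tt ih =>
        intro j0 st j hj
        cases j with
        | zero => simp [wl, scanFold, cget]
        | succ jj =>
            simp only [wl, List.getD_cons_succ]
            rw [ih (j0+1) _ jj (by simpa using hj)]
            simp only [List.take_succ_cons, scanFold, cget, List.getD_cons_succ]
            congr 2
            omega
  simpa using key c 0 st j h

theorem scanStep_zero (sumas : List Nat) (j : Nat) (st : Nat × Int × Bool) :
    scanStep sumas j st 0 = (st, 0) := by simp [scanStep]

theorem scanStep_ne (sumas : List Nat) (j : Nat) (st : Nat × Int × Bool) {v : Int} (hv : v ≠ 0) :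
    scanStep sumas j st v =
      if 0 < st.1 ∧ v = st.2.1 ∧ st.2.2 = false ∧ (j+1) ∉ sumas then
        ((st.1, 2*v, true), ((j:Int) - (st.1:Int)) + 1)
      else ((st.1 + 1, v, decide ((j+1) ∈ sumas)), (j:Int) - (st.1:Int)) := by
  simp [scanStep, hv]

theorem wl_swap_mid (sumas : List Nat) (suf : List Int) (v : Int) (m : Nat)
    (st : Nat × Int × Bool) (hv : v ≠ 0)
    (h1 : (m+1) ∉ sumas) (h2 : (m+2) ∉ sumas) :
    wl sumas (v :: 0 :: suf) m st =
      ((scanStep sumas (m+1) st v).2 - 1) :: 0 ::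
        wl sumas suf (m+2) (scanStep sumas (m+1) st v).1 ∧
    wl sumas (0 :: v :: suf) m st =
      0 :: (scanStep sumas (m+1) st v).2 ::
        wl sumas suf (m+2) (scanStep sumas (m+1) st v).1 := by
  have e0 : ∀ j st', wl sumas (0 :: v :: suf) j st' =
      0 :: (scanStep sumas (j+1) st' v).2 ::
        wl sumas suf (j+2) (scanStep sumas (j+1) st' v).1 := by
    intro j st'
    simp only [wl, scanStep_zero]
  have e1 : wl sumas (v :: 0 :: suf) m st =
      (scanStep sumas m st v).2 :: 0 ::
        wl sumas suf (m+2) (scanStep sumas m st v).1 := by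
    simp only [wl, scanStep_zero]
  have hsame : (scanStep sumas m st v).1 = (scanStep sumas (m+1) st v).1 ∧
      (scanStep sumas m st v).2 = (scanStep sumas (m+1) st v).2 - 1 := by
    rw [scanStep_ne sumas m st hv, scanStep_ne sumas (m+1) st hv]
    by_cases hc : 0 < st.1 ∧ v = st.2.1 ∧ st.2.2 = false
    · rw [if_pos ⟨hc.1, hc.2.1, hc.2.2, h1⟩, if_pos ⟨hc.1, hc.2.1, hc.2.2, by simpa using h2⟩]
      constructor
      · rfl
      · push_cast; ring
    · have hn1 : ¬ (0 < st.1 ∧ v = st.2.1 ∧ st.2.2 = false ∧ (m+1) ∉ sumas) := by tauto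
      have hn2 : ¬ (0 < st.1 ∧ v = st.2.1 ∧ st.2.2 = false ∧ (m+1+1) ∉ sumas) := by tauto
      rw [if_neg hn1, if_neg hn2]
      have hm1 : ((m+1) ∈ sumas) = False := by simp [h1]
      have hm2 : ((m+1+1) ∈ sumas) = False := by simp; exact h2
      constructor
      · simp [hm1, hm2]
      · push_cast; ring
  refine ⟨?_, by rw [e0 m st]⟩
  rw [e1, hsame.1, hsame.2]

theorem prefix_scan (c : List Int) (sumas : List Nat) (m : Nat)
    (hm : m ≤ c.length)
    (h0 : ∀ l < m, cget c l ≠ 0)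
    (h1 : ∀ l, 1 ≤ l → l < m → ¬ mergecond c sumas l) :
    (∀ w ∈ wl sumas (c.take m) 0 (0,0,false), w = 0) ∧
    scanFold sumas (c.take m) 0 (0,0,false) =
      (m, if m = 0 then 0 else cget c (m-1), if m = 0 then false else decide (m ∈ sumas)) := by
  induction m with
  | zero => simp [wl, scanFold]
  | succ mm ih =>
      have hmm : mm < c.length := by omega
      obtain ⟨ihw, ihs⟩ := ih (by omega) (fun l hl => h0 l (by omega))
        (fun l hl1 hl2 => h1 l hl1 (by omega))
      have hsplit : c.take (mm+1) = c.take mm ++ [cget c mm] :=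
        take_succ_of_lt c mm hmm
      have hlen : (c.take mm).length = mm := by simp [List.length_take]; omega
      have hvm : cget c mm ≠ 0 := h0 mm (by omega)
      have hstep : scanStep sumas mm (scanFold sumas (c.take mm) 0 (0,0,false)) (cget c mm) =
          ((mm+1, cget c mm, decide ((mm+1) ∈ sumas)), 0) := by
        rw [ihs, scanStep_ne sumas mm _ hvm]
        by_cases hmz : mm = 0
        · subst hmz
          rw [if_neg (by simp)]
          simp
        · simp only [if_neg hmz]
          have hnm : ¬ mergecond c sumas mm := h1 mm (by omega) (by omega)
          have : ¬ (0 < mm ∧ cget c mm = cget c (mm-1) ∧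
              (decide (mm ∈ sumas) : Bool) = false ∧ (mm+1) ∉ sumas) := by
            intro ⟨a1, a2, a3, a4⟩
            exact hnm ⟨hvm, a2, by simpa using a3, a4⟩
          rw [if_neg this]
          simp
      constructor
      · intro w hw
        rw [hsplit, wl_append] at hw
        simp only [List.mem_append] at hw
        rcases hw with hw | hw
        · exact ihw w hw
        · simp only [hlen, Nat.zero_add, wl] at hw
          rw [hstep] at hw
          simp at hw
          exact hw
      · rw [hsplit, scanFold_append]
        simp only [hlen, Nat.zero_add, scanFold]
        rw [hstep]
        simp

theorem getD_mid (pre : List Int) (a b : Int) (suf : List Int) (j : Nat) :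
    (pre ++ a :: b :: suf).getD j 0 =
      if j < pre.length then pre.getD j 0
      else if j = pre.length then a
      else if j = pre.length + 1 then b
      else suf.getD (j - (pre.length + 2)) 0 := by
  rcases Nat.lt_trichotomy j pre.length with h | h | h
  · rw [if_pos h]
    rw [List.getD_append _ _ _ _ h]
  · subst h
    rw [List.getD_append_right _ _ _ _ (le_refl _)]
    simp
  · rw [if_neg (by omega)]
    rw [List.getD_append_right _ _ _ _ (by omega)]
    rcases Nat.lt_trichotomy j (pre.length + 1) with h2 | h2 | h2
    · omega
    · rw [if_neg (by omega), if_pos h2]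
      have : j - pre.length = 1 := by omega
      simp [this]
    · rw [if_neg (by omega), if_neg (by omega)]
      have : j - pre.length = (j - (pre.length + 2)) + 2 := by omega
      simp [this]

theorem split_two (c : List Int) (i : Nat) (h1 : 1 ≤ i) (h2 : i < c.length) :
    c = c.take (i-1) ++ cget c (i-1) :: cget c i :: c.drop (i+1) := by
  conv_lhs => rw [← List.take_append_drop (i-1) c]
  congr 1
  have hd1 : c.drop (i-1) = cget c (i-1) :: c.drop i := by
    rw [List.drop_eq_getElem_cons (by omega)]
    congr 1
    · simp [cget, List.getD_eq_getElem?_getD, List.getElem?_eq_getElem (show i-1 < c.length by omega)]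
    · congr 1; omega
  have hd2 : c.drop i = cget c i :: c.drop (i+1) := by
    rw [List.drop_eq_getElem_cons (by omega)]
    congr 1
    simp [cget, List.getD_eq_getElem?_getD, List.getElem?_eq_getElem h2]
  rw [hd1, hd2]

theorem set2_eq (c : List Int) (i : Nat) (h1 : 1 ≤ i) (h2 : i < c.length) (x y : Int) :
    (c.set (i-1) x).set i y = c.take (i-1) ++ x :: y :: c.drop (i+1) := by
  have hlen : (c.take (i-1)).length = i-1 := by simp [List.length_take]; omega
  conv_lhs => rw [split_two c i h1 h2]
  rw [List.set_append, if_neg (by omega), hlen]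
  have : i - 1 - (i-1) = 0 := by omega
  rw [this]
  simp only [List.set_cons_zero]
  rw [List.set_append, if_neg (by omega), hlen]
  have : i - (i-1) = 1 := by omega
  rw [this]
  simp

theorem cget_mid (pre : List Int) (a b : Int) (suf : List Int) (j : Nat) :
    cget (pre ++ a :: b :: suf) j =
      if j < pre.length then cget pre j
      else if j = pre.length then a
      else if j = pre.length + 1 then b
      else cget suf (j - (pre.length + 2)) := getD_mid pre a b suf j

theorem step_move (c : List Int) (sumas : List Nat) (W : Int) (i : Nat)
    (h1 : 1 ≤ i) (h2 : i < c.length)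
    (hS : SInv c sumas) (hF : FInv c sumas)
    (hW : 1 ≤ W) (hM : ∀ j, wle c sumas j ≤ W - (if j < i then 1 else 0))
    (hv : cget c i ≠ 0) (h0 : cget c (i-1) = 0) :
    ((c.set (i-1) (cget c i)).set i 0).length = c.length ∧
    SInv ((c.set (i-1) (cget c i)).set i 0) sumas ∧
    FInv ((c.set (i-1) (cget c i)).set i 0) sumas ∧
    KInv ((c.set (i-1) (cget c i)).set i 0) sumas (i+1) ∧
    Rc ((c.set (i-1) (cget c i)).set i 0) sumas = Rc c sumas - 1 ∧
    (∀ j, wle ((c.set (i-1) (cget c i)).set i 0) sumas j ≤ W - (if j < i+1 then 1 else 0)) := by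
  set v := cget c i with hvdef
  set pre := c.take (i-1) with hpre
  set suf := c.drop (i+1) with hsuf
  have hlenpre : pre.length = i - 1 := by simp [hpre, List.length_take]; omega
  have hsplit : c = pre ++ 0 :: v :: suf := by
    conv_lhs => rw [split_two c i h1 h2]
    rw [h0]
  have hset : (c.set (i-1) v).set i 0 = pre ++ v :: 0 :: suf := set2_eq c i h1 h2 v 0
  have hs1 : i ∉ sumas := fun h => (hS i h (i-1) (by omega)) h0
  have hs2 : i + 1 ∉ sumas := fun h => (hS (i+1) h (i-1) (by omega)) h0
  have him1 : i - 1 + 1 = i := by omega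
  have him2 : i - 1 + 2 = i + 1 := by omega
  set st := scanFold sumas pre 0 (0,0,false) with hst
  have hmid := wl_swap_mid sumas suf v (i-1) st hv
    (by rw [him1]; exact hs1) (by rw [him2]; exact hs2)
  rw [him1] at hmid
  set SS := scanStep sumas i st v with hSS
  have wlc : wl sumas c 0 (0,0,false) =
      wl sumas pre 0 (0,0,false) ++ 0 :: SS.2 :: wl sumas suf (i+1) SS.1 := by
    conv_lhs => rw [hsplit]
    rw [wl_append, hlenpre]
    simp only [Nat.zero_add]
    rw [hmid.2, him2]
  have wlc' : wl sumas ((c.set (i-1) v).set i 0) 0 (0,0,false) =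
      wl sumas pre 0 (0,0,false) ++ (SS.2 - 1) :: 0 :: wl sumas suf (i+1) SS.1 := by
    rw [hset, wl_append, hlenpre]
    simp only [Nat.zero_add]
    rw [hmid.1, him2]
  have hwlpre : (wl sumas pre 0 (0,0,false)).length = i - 1 := by
    rw [wl_length, hlenpre]
  -- cells away from i-1, i are unchanged
  have hcc : ∀ l, l ≠ i - 1 → l ≠ i → cget ((c.set (i-1) v).set i 0) l = cget c l := by
    intro l hl1 hl2
    rw [hset, cget_mid]
    conv_rhs => rw [hsplit]
    rw [cget_mid, hlenpre]
    split_ifs <;> first | rfl | omega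
  have hsle : ∀ s ∈ sumas, s ≤ i - 1 := by
    intro s hs
    by_contra hgt
    exact (hS s hs (i-1) (by omega)) h0
  have hwv : wle c sumas i = SS.2 := by
    rw [wle, wlc, getD_mid, hwlpre]
    rw [if_neg (by omega), if_neg (by omega), if_pos (by omega)]
  refine ⟨by simp, ?_, ?_, ?_, ?_, ?_⟩
  · intro s hs l hl
    have hsl := hsle s hs
    rw [hcc l (by omega) (by omega)]
    exact hS s hs l hl
  · intro s hs l hl1 hl2
    have hsl := hsle s hs
    intro hmc
    refine hF s hs l hl1 hl2 ?_
    obtain ⟨m1, m2, m3, m4⟩ := hmc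
    rw [hcc l (by omega) (by omega)] at m1 m2
    rw [hcc (l-1) (by omega) (by omega)] at m2
    exact ⟨m1, m2, m3, m4⟩
  · intro hne
    exfalso
    apply hne
    rw [hset, cget_mid, hlenpre, if_neg (by omega), if_neg (by omega), if_pos (by omega)]
  · rw [Rc, Rc, wlc, wlc']
    simp [List.sum_append]
    ring
  · intro j
    rcases Nat.lt_trichotomy j (i-1) with hj | hj | hj
    · rw [wle, wlc', getD_mid, hwlpre, if_pos (by omega), if_pos (by omega)]
      have := hM j
      rw [if_pos (by omega)] at this
      rw [wle, wlc, getD_mid, hwlpre, if_pos (by omega)] at this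
      exact this
    · rw [wle, wlc', getD_mid, hwlpre, if_neg (by omega), if_pos (by omega),
        if_pos (by omega)]
      have := hM i
      rw [if_neg (by omega)] at this
      rw [hwv] at this
      omega
    · rcases Nat.lt_trichotomy j i with hj2 | hj2 | hj2
      · omega
      · rw [wle, wlc', getD_mid, hwlpre, if_neg (by omega), if_neg (by omega),
          if_pos (by omega), if_pos (by omega)]
        omega
      · rw [wle, wlc', getD_mid, hwlpre, if_neg (by omega), if_neg (by omega),
          if_neg (by omega), if_neg (by omega)]
        have := hM j
        rw [if_neg (by omega)] at this
        rw [wle, wlc, getD_mid, hwlpre, if_neg (by omega), if_neg (by omega),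
          if_neg (by omega)] at this
        exact this

theorem getD_mid1 (pre : List Int) (a : Int) (suf : List Int) (j : Nat) :
    (pre ++ a :: suf).getD j 0 =
      if j < pre.length then pre.getD j 0
      else if j = pre.length then a
      else suf.getD (j - (pre.length + 1)) 0 := by
  rcases Nat.lt_trichotomy j pre.length with h | h | h
  · rw [if_pos h, List.getD_append _ _ _ _ h]
  · subst h
    rw [List.getD_append_right _ _ _ _ (le_refl _)]
    simp
  · rw [if_neg (by omega), if_neg (by omega),
      List.getD_append_right _ _ _ _ (by omega)]
    have : j - pre.length = (j - (pre.length + 1)) + 1 := by omega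
    simp [this]

theorem getD_zero_of_all (L : List Int) (j : Nat) (h : ∀ w ∈ L, w = 0) :
    L.getD j 0 = 0 := by
  rcases Nat.lt_or_ge j L.length with hj | hj
  · rw [List.getD_eq_getElem _ _ hj]
    exact h _ (List.getElem_mem hj)
  · exact List.getD_eq_default _ _ hj

theorem split_one (c : List Int) (i : Nat) (h2 : i < c.length) :
    c = c.take i ++ cget c i :: c.drop (i+1) := by
  conv_lhs => rw [← List.take_append_drop i c]
  congr 1
  rw [List.drop_eq_getElem_cons h2]
  congr 1
  simp [cget, List.getD_eq_getElem?_getD, List.getElem?_eq_getElem h2]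

theorem step_merge (c : List Int) (sumas : List Nat) (W : Int) (i : Nat)
    (h1 : 1 ≤ i) (h2 : i < c.length)
    (hS : SInv c sumas) (hF : FInv c sumas) (hK : KInv c sumas i)
    (hW : 1 ≤ W) (hM : ∀ j, wle c sumas j ≤ W - (if j < i then 1 else 0))
    (hmc : mergecond c sumas i) :
    ((c.set (i-1) (cget c (i-1) * 2)).set i 0).length = c.length ∧
    SInv ((c.set (i-1) (cget c (i-1) * 2)).set i 0) (sumas ++ [i]) ∧
    FInv ((c.set (i-1) (cget c (i-1) * 2)).set i 0) (sumas ++ [i]) ∧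
    KInv ((c.set (i-1) (cget c (i-1) * 2)).set i 0) (sumas ++ [i]) (i+1) ∧
    Rc ((c.set (i-1) (cget c (i-1) * 2)).set i 0) (sumas ++ [i]) = Rc c sumas - 1 ∧
    (∀ j, wle ((c.set (i-1) (cget c (i-1) * 2)).set i 0) (sumas ++ [i]) j ≤
      W - (if j < i+1 then 1 else 0)) := by
  obtain ⟨hv, heq, hs1, hs2⟩ := hmc
  have hv1 : cget c (i-1) ≠ 0 := by rw [← heq]; exact hv
  obtain ⟨hz, hnm⟩ := hK hv1
  set v := cget c (i-1) with hvdef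
  set c' := (c.set (i-1) (v * 2)).set i 0 with hc'
  set sumas' := sumas ++ [i] with hsdef
  set suf := c.drop (i+1) with hsuf
  have hlen' : c'.length = c.length := by simp [hc']
  have hset : c' = c.take (i-1) ++ (v*2) :: 0 :: suf := set2_eq c i h1 h2 (v*2) 0
  have hsplit2 : c = c.take (i-1) ++ v :: cget c i :: suf := split_two c i h1 h2
  have hlenpre : (c.take (i-1)).length = i - 1 := by simp [List.length_take]; omega
  have hcc : ∀ l, l ≠ i - 1 → l ≠ i → cget c' l = cget c l := by
    intro l hl1 hl2
    rw [hset, cget_mid]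
    conv_rhs => rw [hsplit2]
    rw [cget_mid, hlenpre]
    split_ifs <;> first | rfl | omega
  have hci1 : cget c' (i-1) = v * 2 := by
    rw [hset, cget_mid, hlenpre, if_neg (by omega), if_pos (by omega)]
  have hci : cget c' i = 0 := by
    rw [hset, cget_mid, hlenpre, if_neg (by omega), if_neg (by omega), if_pos (by omega)]
  have hz' : ∀ l < i, cget c' l ≠ 0 := by
    intro l hl
    rcases Nat.lt_trichotomy l (i-1) with h | h | h
    · rw [hcc l (by omega) (by omega)]; exact hz l hl
    · rw [h, hci1]
      exact mul_ne_zero hv1 (by norm_num)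
    · omega
  have hnm' : ∀ l, 1 ≤ l → l < i → ¬ mergecond c' sumas' l := by
    intro l hl1 hl2 hmc'
    obtain ⟨m1, m2, m3, m4⟩ := hmc'
    rcases Nat.lt_trichotomy l (i-1) with h | h | h
    · rw [hcc l (by omega) (by omega)] at m1 m2
      rw [hcc (l-1) (by omega) (by omega)] at m2
      refine hnm l hl1 hl2 ⟨m1, m2, ?_, ?_⟩
      · intro hx; exact m3 (by simp [hsdef, hx])
      · intro hx; exact m4 (by simp [hsdef, hx])
    · apply m4
      have : l + 1 = i := by omega
      simp [hsdef, this]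
    · omega
  have hps := prefix_scan c sumas i (by omega) hz hnm
  have hps' := prefix_scan c' sumas' i (by rw [hlen']; omega) hz' hnm'
  have hine : i ≠ 0 := by omega
  have hsf : scanFold sumas (c.take i) 0 (0,0,false) = (i, v, false) := by
    rw [hps.2]
    simp [hine, hs1]
    rfl
  have hsf' : scanFold sumas' (c'.take i) 0 (0,0,false) = (i, v*2, true) := by
    rw [hps'.2]
    simp [hine, hci1, hsdef]
  have hlent : (c.take i).length = i := by simp [List.length_take]; omega
  have hlent' : (c'.take i).length = i := by
    simp [List.length_take, hlen']; omega
  have hSS : scanStep sumas i (i, v, false) (cget c i) = ((i, 2 * cget c i, true), 1) := by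
    rw [scanStep_ne sumas i _ hv]
    rw [if_pos ⟨by omega, by simpa using heq, rfl, hs2⟩]
    simp
  have wlc : wl sumas c 0 (0,0,false) =
      wl sumas (c.take i) 0 (0,0,false) ++
        1 :: wl sumas suf (i+1) (i, 2 * cget c i, true) := by
    conv_lhs => rw [split_one c i h2]
    rw [wl_append, hlent]
    simp only [Nat.zero_add]
    rw [hsf, wl, hSS]
  have hdrop' : c'.drop (i+1) = suf := by
    rw [hset, List.drop_append]
    simp [hlenpre, show i + 1 - (i-1) = 2 from by omega]
    omega
  have hws : wl sumas' suf (i+1) (i, v*2, true) =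
      wl sumas suf (i+1) (i, 2 * cget c i, true) := by
    have hcg : (v * 2) = 2 * cget c i := by rw [heq]; ring
    rw [hcg]
    exact wl_congr_sumas sumas' sumas suf (i+1) _ (fun x hx => by
      have hxi : x ≠ i := by omega
      simp [hsdef, List.mem_append, hxi])
  have wlc' : wl sumas' c' 0 (0,0,false) =
      wl sumas' (c'.take i) 0 (0,0,false) ++
        0 :: wl sumas suf (i+1) (i, 2 * cget c i, true) := by
    conv_lhs => rw [split_one c' i (by rw [hlen']; omega)]
    rw [wl_append, hlent']
    simp only [Nat.zero_add]
    rw [hci, hdrop', hsf', wl, scanStep_zero, ← hws]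
  have hZlen : (wl sumas (c.take i) 0 (0,0,false)).length = i := by
    rw [wl_length, hlent]
  have hZlen' : (wl sumas' (c'.take i) 0 (0,0,false)).length = i := by
    rw [wl_length, hlent']
  have hZsum : (wl sumas (c.take i) 0 (0,0,false)).sum = 0 := List.sum_eq_zero hps.1
  have hZsum' : (wl sumas' (c'.take i) 0 (0,0,false)).sum = 0 := List.sum_eq_zero hps'.1
  refine ⟨hlen', ?_, ?_, ?_, ?_, ?_⟩
  · intro s hs l hl
    have hsle : s ≤ i := by
      rw [hsdef, List.mem_append] at hs
      rcases hs with hs | hs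
      · by_contra hgt
        exact hF s hs i h1 (by omega) ⟨hv, heq, hs1, hs2⟩
      · simp at hs; omega
    exact hz' l (by omega)
  · intro s hs l hl1 hl2
    have hsle : s ≤ i := by
      rw [hsdef, List.mem_append] at hs
      rcases hs with hs | hs
      · by_contra hgt
        exact hF s hs i h1 (by omega) ⟨hv, heq, hs1, hs2⟩
      · simp at hs; omega
    exact hnm' l hl1 (by omega)
  · intro hne
    simp only [Nat.add_sub_cancel] at hne
    rw [hci] at hne
    exact absurd rfl hne
  · rw [Rc, Rc, wlc, wlc']
    rw [List.sum_append, List.sum_append, List.sum_cons, List.sum_cons, hZsum, hZsum']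
    ring
  · intro j
    rw [wle, wlc', getD_mid1, hZlen']
    rcases Nat.lt_trichotomy j i with hj | hj | hj
    · rw [if_pos hj, if_pos (by omega)]
      have : (wl sumas' (c'.take i) 0 (0,0,false)).getD j 0 = 0 :=
        getD_zero_of_all _ _ hps'.1
      rw [this]
      omega
    · rw [if_neg (by omega), if_pos hj, if_pos (by omega)]
      omega
    · rw [if_neg (by omega), if_neg (by omega), if_neg (by omega)]
      have := hM j
      rw [if_neg (by omega)] at this
      rw [wle, wlc, getD_mid1, hZlen, if_neg (by omega), if_neg (by omega)] at this
      exact this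

theorem wle_zero_cell (c : List Int) (sumas : List Nat) (j : Nat)
    (h : j < c.length) (h0 : cget c j = 0) : wle c sumas j = 0 := by
  rw [wle, wl_getD_eq sumas c _ j h, h0, scanStep_zero]

theorem step_noop (c : List Int) (sumas : List Nat) (W : Int) (i : Nat)
    (h1 : 1 ≤ i) (h2 : i < c.length)
    (hW : 1 ≤ W) (hM : ∀ j, wle c sumas j ≤ W - (if j < i then 1 else 0))
    (hnmv : ¬(cget c i ≠ 0 ∧ cget c (i-1) = 0)) (hnmg : ¬ mergecond c sumas i)
    (hK : KInv c sumas i) :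
    KInv c sumas (i+1) ∧ (∀ j, wle c sumas j ≤ W - (if j < i+1 then 1 else 0)) := by
  constructor
  · intro hne
    simp only [Nat.add_sub_cancel] at hne
    have hv1 : cget c (i-1) ≠ 0 := by
      by_contra h0
      exact hnmv ⟨hne, h0⟩
    obtain ⟨hz, hnm⟩ := hK hv1
    constructor
    · intro l hl
      rcases Nat.lt_or_ge l i with h | h
      · exact hz l h
      · have : l = i := by omega
        rw [this]; exact hne
    · intro l hl1 hl2
      rcases Nat.lt_or_ge l i with h | h
      · exact hnm l hl1 h
      · have : l = i := by omega
        rw [this]; exact hnmg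
  · intro j
    rcases Nat.lt_trichotomy j i with hj | hj | hj
    · have := hM j
      rw [if_pos hj] at this
      rw [if_pos (by omega)]
      exact this
    · subst hj
      rw [if_pos (by omega)]
      by_cases hcj : cget c j = 0
      · rw [wle_zero_cell c sumas j h2 hcj]
        omega
      · have hv1 : cget c (j-1) ≠ 0 := by
          by_contra h0
          exact hnmv ⟨hcj, h0⟩
        have hj1 : j - 1 < c.length := by omega
        set st := scanFold sumas (c.take (j-1)) 0 (0,0,false) with hst
        have hw1 : wle c sumas (j-1) = (scanStep sumas (j-1) st (cget c (j-1))).2 :=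
          wl_getD_eq sumas c _ (j-1) hj1
        have hsfj : scanFold sumas (c.take j) 0 (0,0,false) =
            (scanStep sumas (j-1) st (cget c (j-1))).1 := by
          have htk : c.take j = c.take (j-1) ++ [cget c (j-1)] := by
            have := take_succ_of_lt c (j-1) hj1
            rw [show j - 1 + 1 = j from by omega] at this
            exact this
          rw [htk, scanFold_append]
          have hlt : (c.take (j-1)).length = j - 1 := by
            simp [List.length_take]; omega
          rw [hlt]
          simp [scanFold]
          rfl
        have hw2 : wle c sumas j =
            (scanStep sumas j ((scanStep sumas (j-1) st (cget c (j-1))).1) (cget c j)).2 := by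
          rw [wle, wl_getD_eq sumas c _ j h2, hsfj]
        have hkey : wle c sumas j = wle c sumas (j-1) := by
          rw [hw1, hw2]
          rw [scanStep_ne sumas (j-1) st hv1]
          rw [show j - 1 + 1 = j from by omega]
          by_cases hB : 0 < st.1 ∧ cget c (j-1) = st.2.1 ∧ st.2.2 = false ∧ j ∉ sumas
          · rw [if_pos hB]
            rw [scanStep_ne sumas j _ hcj]
            rw [if_neg (by simp)]
            simp
            omega
          · rw [if_neg hB]
            rw [scanStep_ne sumas j _ hcj]
            rw [if_neg ?hc]
            case hc =>
              intro ⟨b1, b2, b3, b4⟩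
              simp only at b2 b3
              exact hnmg ⟨hcj, by rw [b2], by simpa using b3, b4⟩
            simp
            push_cast
            omega
        rw [hkey]
        have := hM (j-1)
        rw [if_pos (by omega)] at this
        exact this
    · have := hM j
      rw [if_neg (by omega)] at this
      rw [if_neg (by omega)]
      exact this

theorem pass_seg (W : Int) (hW : 1 ≤ W) :
    ∀ (m i : Nat) (c : List Int) (sumas : List Nat) (mov : Int),
    1 ≤ i → i + m = c.length →
    SInv c sumas → FInv c sumas → KInv c sumas i →
    (∀ j, wle c sumas j ≤ W - (if j < i then 1 else 0)) →
    ((List.range' i m).foldl stepc (c, sumas, mov)).1.length = c.length ∧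
    SInv ((List.range' i m).foldl stepc (c, sumas, mov)).1
         ((List.range' i m).foldl stepc (c, sumas, mov)).2.1 ∧
    FInv ((List.range' i m).foldl stepc (c, sumas, mov)).1
         ((List.range' i m).foldl stepc (c, sumas, mov)).2.1 ∧
    ((List.range' i m).foldl stepc (c, sumas, mov)).2.2 +
      Rc ((List.range' i m).foldl stepc (c, sumas, mov)).1
         ((List.range' i m).foldl stepc (c, sumas, mov)).2.1 = mov + Rc c sumas ∧
    (∀ j, wle ((List.range' i m).foldl stepc (c, sumas, mov)).1
        ((List.range' i m).foldl stepc (c, sumas, mov)).2.1 j ≤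
        W - (if j < i + m then 1 else 0)) := by
  intro m
  induction m with
  | zero =>
      intro i c sumas mov hi hlen hS hF hK hM
      simp only [List.range'_zero, List.foldl_nil, Nat.add_zero]
      exact ⟨trivial, hS, hF, trivial, hM⟩
  | succ mm ih =>
      intro i c sumas mov hi hlen hS hF hK hM
      rw [List.range'_succ, List.foldl_cons]
      have h2 : i < c.length := by omega
      by_cases hc1 : cget c i ≠ 0 ∧ cget c (i-1) = 0
      · have hstep : stepc (c, sumas, mov) i =
            (((c.set (i-1) (cget c i)).set i 0), sumas, mov + 1) := by
          simp only [stepc]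
          rw [if_pos hc1]
        rw [hstep]
        obtain ⟨e1, e2, e3, e4, e5, e6⟩ :=
          step_move c sumas W i hi h2 hS hF hW hM hc1.1 hc1.2
        obtain ⟨f1, f2, f3, f4, f5⟩ := ih (i+1) _ sumas (mov+1) (by omega)
          (by rw [e1]; omega) e2 e3 e4 e6
        refine ⟨by rw [f1, e1], f2, f3, ?_, ?_⟩
        · rw [f4, e5]; ring
        · intro j
          have := f5 j
          rw [show i + 1 + mm = i + (mm+1) from by omega] at this
          exact this
      · by_cases hc2 : cget c i ≠ 0 ∧ cget c i = cget c (i-1) ∧ i ∉ sumas ∧ i+1 ∉ sumas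
        · have hstep : stepc (c, sumas, mov) i =
              (((c.set (i-1) (cget c (i-1) * 2)).set i 0), sumas ++ [i], mov + 1) := by
            simp only [stepc]
            rw [if_neg hc1, if_pos hc2]
          rw [hstep]
          obtain ⟨e1, e2, e3, e4, e5, e6⟩ :=
            step_merge c sumas W i hi h2 hS hF hK hW hM hc2
          obtain ⟨f1, f2, f3, f4, f5⟩ := ih (i+1) _ (sumas ++ [i]) (mov+1) (by omega)
            (by rw [e1]; omega) e2 e3 e4 e6
          refine ⟨by rw [f1, e1], f2, f3, ?_, ?_⟩
          · rw [f4, e5]; ring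
          · intro j
            have := f5 j
            rw [show i + 1 + mm = i + (mm+1) from by omega] at this
            exact this
        · have hstep : stepc (c, sumas, mov) i = (c, sumas, mov) := by
            simp only [stepc]
            rw [if_neg hc1, if_neg hc2]
          rw [hstep]
          obtain ⟨e4, e6⟩ := step_noop c sumas W i hi h2 hW hM hc1 hc2 hK
          obtain ⟨f1, f2, f3, f4, f5⟩ := ih (i+1) c sumas mov (by omega) (by omega)
            hS hF e4 e6
          refine ⟨f1, f2, f3, f4, ?_⟩
          intro j
          have := f5 j
          rw [show i + 1 + mm = i + (mm+1) from by omega] at this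
          exact this

theorem wle_le_j (c : List Int) (sumas : List Nat) (j : Nat) :
    wle c sumas j ≤ (j : Int) := by
  rcases Nat.lt_or_ge j c.length with hj | hj
  · rw [wle, wl_getD_eq sumas c _ j hj]
    have hk := scanFold_k_le sumas (c.take j) 0 (0,0,false)
    have hkj : (scanFold sumas (c.take j) 0 (0,0,false)).1 ≤ j := by
      refine le_trans hk ?_
      simp [List.length_take]
    by_cases hv : cget c j = 0
    · rw [hv, scanStep_zero]; positivity
    · rw [scanStep_ne sumas j _ hv]
      split_ifs with hB
      · simp only
        omega
      · simp only
        omega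
  · rw [wle, List.getD_eq_default]
    · positivity
    · rw [wl_length]; omega

theorem wle_nonneg (c : List Int) (sumas : List Nat) (j : Nat) :
    0 ≤ wle c sumas j := by
  rcases Nat.lt_or_ge j c.length with hj | hj
  · rw [wle, List.getD_eq_getElem]
    · exact wl_nonneg sumas c 0 (0,0,false) (le_refl 0) _ (List.getElem_mem _)
    · rw [wl_length]; omega
  · rw [wle, List.getD_eq_default]
    rw [wl_length]; omega

theorem wle_beyond (c : List Int) (sumas : List Nat) (j : Nat) (h : c.length ≤ j) :
    wle c sumas j = 0 := by
  rw [wle, List.getD_eq_default]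
  rw [wl_length]; omega

theorem wle_zero_idx (c : List Int) (sumas : List Nat) : wle c sumas 0 = 0 := by
  rcases Nat.lt_or_ge 0 c.length with hj | hj
  · rw [wle, wl_getD_eq sumas c _ 0 hj]
    simp only [List.take_zero, scanFold]
    by_cases hv : cget c 0 = 0
    · rw [hv, scanStep_zero]
    · rw [scanStep_ne sumas 0 _ hv, if_neg (by simp)]
      simp
  · exact wle_beyond c sumas 0 hj

theorem KInv_one (c : List Int) (sumas : List Nat) : KInv c sumas 1 := by
  intro h
  refine ⟨fun l hl => ?_, fun l hl1 hl2 => by omega⟩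
  have : l = 0 := by omega
  rw [this]
  simpa using h

theorem pass_full (c : List Int) (sumas : List Nat) (mov W : Int)
    (hn : 1 ≤ c.length) (hS : SInv c sumas) (hF : FInv c sumas)
    (hW : 1 ≤ W) (hB : ∀ j, wle c sumas j ≤ W) :
    (passc c.length (c, sumas, mov)).1.length = c.length ∧
    SInv (passc c.length (c, sumas, mov)).1 (passc c.length (c, sumas, mov)).2.1 ∧
    FInv (passc c.length (c, sumas, mov)).1 (passc c.length (c, sumas, mov)).2.1 ∧
    (passc c.length (c, sumas, mov)).2.2 +
      Rc (passc c.length (c, sumas, mov)).1 (passc c.length (c, sumas, mov)).2.1 =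
      mov + Rc c sumas ∧
    (∀ j, wle (passc c.length (c, sumas, mov)).1 (passc c.length (c, sumas, mov)).2.1 j ≤ W - 1) := by
  have hM : ∀ j, wle c sumas j ≤ W - (if j < 1 then 1 else 0) := by
    intro j
    rcases Nat.eq_zero_or_pos j with hj | hj
    · rw [hj, wle_zero_idx, if_pos (by omega)]
      omega
    · rw [if_neg (by omega)]
      have := hB j
      omega
  simp only [passc]
  obtain ⟨e1, e2, e3, e4, e5⟩ := pass_seg W hW (c.length - 1) 1 c sumas mov (le_refl 1)
    (by omega) hS hF (KInv_one c sumas) hM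
  refine ⟨e1, e2, e3, e4, ?_⟩
  intro j
  rcases Nat.lt_or_ge j c.length with hj | hj
  · have := e5 j
    rw [if_pos (by omega)] at this
    exact this
  · rw [wle_beyond _ _ j (by rw [e1]; omega)]
    omega

theorem foldl_iterate {α β : Type} (l : List α) (g : β → β) (s : β) :
    l.foldl (fun s _ => g s) s = g^[l.length] s := by
  induction l generalizing s with
  | nil => rfl
  | cons x t ih => simp [ih, Function.iterate_succ_apply]

theorem iter_pass (n : Nat) (hn : 1 ≤ n) :
    ∀ (k : Nat) (c : List Int) (sumas : List Nat) (mov B : Int),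
    c.length = n → SInv c sumas → FInv c sumas → 0 ≤ B →
    (∀ j, wle c sumas j ≤ B) →
    ((passc n)^[k] (c, sumas, mov)).1.length = n ∧
    ((passc n)^[k] (c, sumas, mov)).2.2 +
      Rc ((passc n)^[k] (c, sumas, mov)).1 ((passc n)^[k] (c, sumas, mov)).2.1 =
      mov + Rc c sumas ∧
    (∀ j, wle ((passc n)^[k] (c, sumas, mov)).1 ((passc n)^[k] (c, sumas, mov)).2.1 j ≤
      max (B - k) 0) := by
  intro k
  induction k with
  | zero =>
      intro c sumas mov B hlen hS hF hB0 hB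
      refine ⟨hlen, by simp, fun j => ?_⟩
      have := hB j
      simp only [Function.iterate_zero, id]
      omega
  | succ kk ih =>
      intro c sumas mov B hlen hS hF hB0 hB
      rw [Function.iterate_succ_apply]
      have hW : (1:Int) ≤ max B 1 := le_max_right _ _
      have hB' : ∀ j, wle c sumas j ≤ max B 1 := fun j => le_trans (hB j) (le_max_left _ _)
      obtain ⟨e1, e2, e3, e4, e5⟩ := by
        have := pass_full c sumas mov (max B 1) (by omega) hS hF hW hB'
        rw [hlen] at this
        exact this
      obtain ⟨f1, f2, f3⟩ := ih (passc n (c, sumas, mov)).1 (passc n (c, sumas, mov)).2.1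
        (passc n (c, sumas, mov)).2.2 (max B 1 - 1) e1 e2 e3 (by omega) e5
      have hre : ((passc n)^[kk] ((passc n (c,sumas,mov)).1, (passc n (c,sumas,mov)).2.1,
          (passc n (c,sumas,mov)).2.2)) = (passc n)^[kk] (passc n (c,sumas,mov)) := by
        congr 1
      rw [hre] at f1 f2 f3
      refine ⟨f1, ?_, fun j => ?_⟩
      · rw [f2, e4]
      · have := f3 j
        have hmx : max (max B 1 - 1 - kk) 0 ≤ max (B - (kk+1)) 0 := by omega
        omega

theorem Rc_zero_of_wle (c : List Int) (sumas : List Nat)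
    (h : ∀ j, wle c sumas j ≤ 0) : Rc c sumas = 0 := by
  apply List.sum_eq_zero
  intro w hw
  obtain ⟨j, hj, hg⟩ := List.mem_iff_getElem.mp hw
  rw [wl_length] at hj
  have h1 : wle c sumas j = w := by
    rw [wle, List.getD_eq_getElem _ _ (by rw [wl_length]; exact hj)]
    exact hg
  have := h j
  have := wle_nonneg c sumas j
  omega

theorem col_count (c : List Int) (mov : Int) :
    ((List.range (c.length - 1)).foldl (fun s _ => passc c.length s)
      (c, ([] : List Nat), mov)).2.2 = mov + Rc c [] := by
  rcases Nat.eq_zero_or_pos c.length with hn | hn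
  · have hc : c = [] := List.length_eq_zero_iff.mp hn
    subst hc
    simp [Rc, wl]
  · rw [foldl_iterate]
    simp only [List.length_range]
    have hSe : SInv c [] := fun s hs => absurd hs (List.not_mem_nil)
    have hFe : FInv c [] := fun s hs => absurd hs (List.not_mem_nil)
    have hBd : ∀ j, wle c [] j ≤ (c.length : Int) - 1 := by
      intro j
      rcases Nat.lt_or_ge j c.length with hj | hj
      · have := wle_le_j c [] j
        omega
      · rw [wle_beyond c [] j hj]
        omega
    obtain ⟨f1, f2, f3⟩ := iter_pass c.length hn (c.length - 1) c [] mov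
      ((c.length : Int) - 1) rfl hSe hFe (by omega) hBd
    have hR0 : Rc ((passc c.length)^[c.length - 1] (c, [], mov)).1
        ((passc c.length)^[c.length - 1] (c, [], mov)).2.1 = 0 := by
      apply Rc_zero_of_wle
      intro j
      have := f3 j
      have hmx : max (((c.length : Int) - 1) - (c.length - 1 : Nat)) 0 = 0 := by
        have : ((c.length - 1 : Nat) : Int) = (c.length : Int) - 1 := by omega
        omega
      omega
    have := f2
    rw [hR0] at this
    omega

-- ===== grid layer =====
def proj (tab : List (List Int)) (a : Nat) : List Int := tab.map (fun r => r.getD a 0)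

def tabOK (n : Nat) (tab : List (List Int)) : Prop :=
  tab.length = n ∧ ∀ r ∈ tab, n ≤ r.length

theorem proj_length (tab : List (List Int)) (a : Nat) : (proj tab a).length = tab.length := by
  simp [proj]

theorem proj_cget (tab : List (List Int)) (a i : Nat) :
    cget (proj tab a) i = pyCell tab i a := by
  rcases Nat.lt_or_ge i tab.length with hi | hi
  · rw [cget, pyCell, proj]
    rw [List.getD_eq_getElem _ _ (by simpa using hi), List.getD_eq_getElem _ _ hi]
    simp
  · rw [cget, pyCell, List.getD_eq_default _ _ (by simpa [proj] using hi),
      List.getD_eq_default _ _ hi]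
    simp

theorem pySet_tabOK (n : Nat) (tab : List (List Int)) (i a : Nat) (v : Int)
    (h : tabOK n tab) : tabOK n (pySet tab i a v) := by
  obtain ⟨h1, h2⟩ := h
  refine ⟨by simp [pySet, h1], ?_⟩
  intro r hr
  rw [pySet] at hr
  obtain ⟨j, hj, hg⟩ := List.mem_iff_getElem.mp hr
  have hjt : j < tab.length := by simpa using hj
  rw [List.getElem_modify] at hg
  split_ifs at hg
  · rw [← hg]
    have := h2 _ (List.getElem_mem hjt)
    simpa using this
  · rw [← hg]
    exact h2 _ (List.getElem_mem hjt)

theorem getD_set_self' (l : List Int) (a : Nat) (v : Int) (h : a < l.length) :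
    (l.set a v).getD a 0 = v := by
  rw [List.getD_eq_getElem _ _ (by simpa using h)]
  simp

theorem getD_set_ne' (l : List Int) (a b : Nat) (v : Int) (h : b ≠ a) :
    (l.set a v).getD b 0 = l.getD b 0 := by
  rcases Nat.lt_or_ge b l.length with hb | hb
  · rw [List.getD_eq_getElem _ _ (by simpa using hb), List.getD_eq_getElem _ _ hb]
    simp only [List.getElem_set]
    rw [if_neg (fun h' => h h'.symm)]
  · rw [List.getD_eq_default _ _ (by simpa using hb), List.getD_eq_default _ _ hb]

theorem proj_pySet_same (n : Nat) (tab : List (List Int)) (i a : Nat) (v : Int)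
    (h : tabOK n tab) (hi : i < n) (ha : a < n) :
    proj (pySet tab i a v) a = (proj tab a).set i v := by
  obtain ⟨h1, h2⟩ := h
  apply List.ext_getElem
  · simp [proj, pySet]
  · intro j hj1 hj2
    simp only [proj, pySet, List.length_map, List.length_modify] at hj1 hj2
    simp only [proj, pySet]
    rw [List.getElem_map, List.getElem_modify, List.getElem_set]
    by_cases hij : i = j
    · subst hij
      rw [if_pos rfl, if_pos rfl]
      have hrow : a < tab[i].length := by
        have := h2 _ (List.getElem_mem (show i < tab.length by omega))
        omega
      rw [getD_set_self' _ _ _ hrow]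
    · rw [if_neg hij, if_neg hij, List.getElem_map]

theorem proj_pySet_other (tab : List (List Int)) (i a a' : Nat) (v : Int) (h : a' ≠ a) :
    proj (pySet tab i a v) a' = proj tab a' := by
  apply List.ext_getElem
  · simp [proj, pySet]
  · intro j hj1 hj2
    simp only [proj, pySet, List.length_map, List.length_modify] at hj1 hj2
    simp only [proj, pySet]
    rw [List.getElem_map, List.getElem_map, List.getElem_modify]
    by_cases hij : i = j
    · subst hij
      rw [if_pos rfl, getD_set_ne' _ _ _ _ h]
    · rw [if_neg hij]

theorem stepA_proj (n : Nat) (tab : List (List Int)) (sumas : List Nat) (mov : Int)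
    (a i : Nat) (hOK : tabOK n tab) (ha : a < n) (h1 : 1 ≤ i) (h2 : i < n) :
    tabOK n (stepA a (tab, sumas, mov) i).1 ∧
    proj (stepA a (tab, sumas, mov) i).1 a = (stepc (proj tab a, sumas, mov) i).1 ∧
    (stepA a (tab, sumas, mov) i).2 = (stepc (proj tab a, sumas, mov) i).2 ∧
    (∀ a', a' ≠ a → proj (stepA a (tab, sumas, mov) i).1 a' = proj tab a') := by
  have hi1 : i - 1 < n := by omega
  have hOK1 : ∀ v, tabOK n (pySet tab (i-1) a v) := fun v => pySet_tabOK n tab _ _ v hOK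
  have hOK2 : ∀ v w, tabOK n (pySet (pySet tab (i-1) a v) i a w) :=
    fun v w => pySet_tabOK n _ _ _ w (hOK1 v)
  simp only [stepA, stepc, proj_cget]
  by_cases hc1 : pyCell tab i a ≠ 0 ∧ pyCell tab (i-1) a = 0
  · rw [if_pos hc1, if_pos hc1]
    refine ⟨hOK2 _ _, ?_, rfl, ?_⟩
    · simp only
      rw [proj_pySet_same n _ i a 0 (hOK1 _) (by omega) ha,
        proj_pySet_same n tab (i-1) a _ hOK hi1 ha]
    · intro a' ha'
      simp only
      rw [proj_pySet_other _ i a a' 0 ha', proj_pySet_other _ (i-1) a a' _ ha']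
  · rw [if_neg hc1, if_neg hc1]
    by_cases hc2 : pyCell tab i a ≠ 0 ∧ pyCell tab i a = pyCell tab (i-1) a ∧
        i ∉ sumas ∧ i+1 ∉ sumas
    · rw [if_pos hc2, if_pos hc2]
      refine ⟨hOK2 _ _, ?_, rfl, ?_⟩
      · simp only
        rw [proj_pySet_same n _ i a 0 (hOK1 _) (by omega) ha,
          proj_pySet_same n tab (i-1) a _ hOK hi1 ha]
      · intro a' ha'
        simp only
        rw [proj_pySet_other _ i a a' 0 ha', proj_pySet_other _ (i-1) a a' _ ha']
    · rw [if_neg hc2, if_neg hc2]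
      exact ⟨hOK, rfl, rfl, fun a' _ => rfl⟩

theorem foldsteps_proj (n a : Nat) (ha : a < n) :
    ∀ (L : List Nat), (∀ i ∈ L, 1 ≤ i ∧ i < n) →
    ∀ (tab : List (List Int)) (sumas : List Nat) (mov : Int), tabOK n tab →
    tabOK n (L.foldl (stepA a) (tab, sumas, mov)).1 ∧
    proj (L.foldl (stepA a) (tab, sumas, mov)).1 a =
      (L.foldl stepc (proj tab a, sumas, mov)).1 ∧
    (L.foldl (stepA a) (tab, sumas, mov)).2 = (L.foldl stepc (proj tab a, sumas, mov)).2 ∧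
    (∀ a', a' ≠ a → proj (L.foldl (stepA a) (tab, sumas, mov)).1 a' = proj tab a') := by
  intro L
  induction L with
  | nil =>
      intro _ tab sumas mov hOK
      exact ⟨hOK, rfl, rfl, fun _ _ => rfl⟩
  | cons x t ih =>
      intro hL tab sumas mov hOK
      obtain ⟨hx1, hx2⟩ := hL x (List.mem_cons_self)
      obtain ⟨e1, e2, e3, e4⟩ := stepA_proj n tab sumas mov a x hOK ha hx1 hx2
      simp only [List.foldl_cons]
      have hsplit : stepA a (tab, sumas, mov) x =
          ((stepA a (tab, sumas, mov) x).1, (stepA a (tab, sumas, mov) x).2.1,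
           (stepA a (tab, sumas, mov) x).2.2) := rfl
      rw [hsplit]
      obtain ⟨f1, f2, f3, f4⟩ := ih (fun i hi => hL i (List.mem_cons_of_mem _ hi))
        (stepA a (tab, sumas, mov) x).1 (stepA a (tab, sumas, mov) x).2.1
        (stepA a (tab, sumas, mov) x).2.2 e1
      have hcol : ((proj (stepA a (tab, sumas, mov) x).1 a,
          (stepA a (tab, sumas, mov) x).2.1, (stepA a (tab, sumas, mov) x).2.2)) =
          stepc (proj tab a, sumas, mov) x := by
        rw [e2]
        rw [show ((stepA a (tab, sumas, mov) x).2.1, (stepA a (tab, sumas, mov) x).2.2) =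
          (stepA a (tab, sumas, mov) x).2 from rfl, e3]
      rw [hcol] at f2 f3
      refine ⟨f1, f2, f3, fun a' ha' => ?_⟩
      rw [f4 a' ha', e4 a' ha']

theorem eloop_proj (n a : Nat) (ha : a < n) :
    ∀ (L : List Nat) (tab : List (List Int)) (sumas : List Nat) (mov : Int), tabOK n tab →
    tabOK n (L.foldl (fun s2 _ => (List.range' 1 (n-1)).foldl (stepA a) s2) (tab, sumas, mov)).1 ∧
    proj (L.foldl (fun s2 _ => (List.range' 1 (n-1)).foldl (stepA a) s2) (tab, sumas, mov)).1 a =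
      (L.foldl (fun s _ => passc n s) (proj tab a, sumas, mov)).1 ∧
    (L.foldl (fun s2 _ => (List.range' 1 (n-1)).foldl (stepA a) s2) (tab, sumas, mov)).2 =
      (L.foldl (fun s _ => passc n s) (proj tab a, sumas, mov)).2 ∧
    (∀ a', a' ≠ a →
      proj (L.foldl (fun s2 _ => (List.range' 1 (n-1)).foldl (stepA a) s2) (tab, sumas, mov)).1 a' =
        proj tab a') := by
  intro L
  induction L with
  | nil =>
      intro tab sumas mov hOK
      exact ⟨hOK, rfl, rfl, fun _ _ => rfl⟩
  | cons x t ih =>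
      intro tab sumas mov hOK
      have hbnd : ∀ i ∈ List.range' 1 (n-1), 1 ≤ i ∧ i < n := by
        intro i hi
        rw [List.mem_range'] at hi
        omega
      obtain ⟨e1, e2, e3, e4⟩ := foldsteps_proj n a ha (List.range' 1 (n-1)) hbnd tab sumas mov hOK
      simp only [List.foldl_cons]
      set s1 := (List.range' 1 (n-1)).foldl (stepA a) (tab, sumas, mov) with hs1
      have hsplit : s1 = (s1.1, s1.2.1, s1.2.2) := rfl
      rw [hsplit]
      obtain ⟨f1, f2, f3, f4⟩ := ih s1.1 s1.2.1 s1.2.2 e1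
      have hcol : (proj s1.1 a, s1.2.1, s1.2.2) = passc n (proj tab a, sumas, mov) := by
        rw [e2]
        rw [show (s1.2.1, s1.2.2) = s1.2 from rfl, e3]
        rfl
      rw [hcol] at f2 f3
      refine ⟨f1, f2, f3, fun a' ha' => ?_⟩
      rw [f4 a' ha', e4 a' ha']

theorem outer_loop (n : Nat) (tab0 : List (List Int)) :
    ∀ (L : List Nat) (tab : List (List Int)) (mov : Int), tabOK n tab → L.Nodup →
    (∀ a ∈ L, a < n) →
    (∀ a ∈ L, proj tab a = proj tab0 a) →
    ((L.foldl (fun (s : List (List Int) × Int) a =>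
      ((((List.range (n - 1)).foldl
          (fun s2 _ => (List.range' 1 (n-1)).foldl (stepA a) s2) (s.1, ([] : List Nat), s.2))).1,
       (((List.range (n - 1)).foldl
          (fun s2 _ => (List.range' 1 (n-1)).foldl (stepA a) s2) (s.1, ([] : List Nat), s.2))).2.2))
      (tab, mov)).2) = mov + (L.map (fun a => Rc (proj tab0 a) [])).sum := by
  intro L
  induction L with
  | nil => intro tab mov _ _ _ _; simp
  | cons x t ih =>
      intro tab mov hOK hnd hbnd hpr
      have hx : x < n := hbnd x List.mem_cons_self
      obtain ⟨e1, e2, e3, e4⟩ := eloop_proj n x hx (List.range (n-1)) tab [] mov hOK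
      simp only [List.foldl_cons]
      set s1 := (List.range (n-1)).foldl
        (fun s2 _ => (List.range' 1 (n-1)).foldl (stepA x) s2) (tab, ([] : List Nat), mov) with hs1
      have hlenc : (proj tab x).length = n := by rw [proj_length, hOK.1]
      have hcount : s1.2.2 = mov + Rc (proj tab x) [] := by
        have := col_count (proj tab x) mov
        rw [hlenc] at this
        have he3 : s1.2.2 = ((List.range (n-1)).foldl (fun s _ => passc n s)
            (proj tab x, [], mov)).2.2 := by rw [e3]
        rw [he3, this]
      have := ih s1.1 s1.2.2 e1 (List.Nodup.of_cons hnd)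
        (fun a hat => hbnd a (List.mem_cons_of_mem _ hat)) ?_
      · rw [this, hcount, hpr x List.mem_cons_self]
        simp [List.sum_cons]
        ring
      · intro a hat
        have hax : a ≠ x := by
          intro h
          rw [h] at hat
          exact (List.nodup_cons.mp hnd).1 hat
        rw [e4 a hax]
        exact hpr a (List.mem_cons_of_mem _ hat)

theorem altB (tab : List (List Int)) (a : Nat) :
    ∀ (m j : Nat) (st : Nat × Int × Bool × Int),
    ((List.range' j m).foldl (altColStep tab a) st).2.2.2 =
      st.2.2.2 + (wl [] ((List.range' j m).map (fun i => pyCell tab i a)) j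
        (st.1, st.2.1, st.2.2.1)).sum := by
  intro m
  induction m with
  | zero => intro j st; simp [wl]
  | succ mm ih =>
      intro j st
      rw [List.range'_succ, List.foldl_cons, List.map_cons, wl]
      by_cases hv : pyCell tab j a = 0
      · have hstep : altColStep tab a st j = st := by
          simp only [altColStep, pyCell] at *
          rw [if_pos hv]
        rw [hstep]
        have hv' : (fun i => pyCell tab i a) j = 0 := hv
        rw [hv] at *
        rw [scanStep_zero, ih]
        simp
      · have hv' : (fun i => pyCell tab i a) j = pyCell tab j a := rfl
        by_cases hm : 0 < st.1 ∧ pyCell tab j a = st.2.1 ∧ st.2.2.1 = false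
        · have hstep : altColStep tab a st j =
              (st.1, 2*(pyCell tab j a), true, st.2.2.2 + ((j:Int) - (st.1:Int)) + 1) := by
            simp only [altColStep, pyCell] at *
            rw [if_neg hv, if_pos hm]
          have hscan : scanStep [] j (st.1, st.2.1, st.2.2.1) (pyCell tab j a) =
              ((st.1, 2*(pyCell tab j a), true), ((j:Int) - (st.1:Int)) + 1) := by
            rw [scanStep_ne [] j _ hv, if_pos ⟨hm.1, hm.2.1, hm.2.2, by simp⟩]
          rw [hstep, hscan, ih, List.sum_cons]
          simp only
          ring
        · have hstep : altColStep tab a st j =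
              (st.1 + 1, pyCell tab j a, false, st.2.2.2 + ((j:Int) - (st.1:Int))) := by
            simp only [altColStep, pyCell] at *
            rw [if_neg hv, if_neg hm]
          have hscan : scanStep [] j (st.1, st.2.1, st.2.2.1) (pyCell tab j a) =
              ((st.1 + 1, pyCell tab j a, false), (j:Int) - (st.1:Int)) := by
            rw [scanStep_ne [] j _ hv, if_neg (by
              intro ⟨b1, b2, b3, _⟩
              exact hm ⟨b1, b2, b3⟩)]
            simp
          rw [hstep, hscan, ih, List.sum_cons]
          simp only
          ring

theorem proj_map_range (tab : List (List Int)) (a : Nat) :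
    (List.range tab.length).map (fun i => pyCell tab i a) = proj tab a := by
  apply List.ext_getElem
  · simp [proj]
  · intro j hj1 hj2
    have hjt : j < tab.length := by simpa [proj] using hj2
    simp only [List.getElem_map, List.getElem_range, proj]
    rw [pyCell, List.getD_eq_getElem _ _ hjt]

theorem alt_col_eq (tab : List (List Int)) (a : Nat) :
    ((List.range tab.length).foldl (altColStep tab a) (0,0,false,0)).2.2.2 =
      Rc (proj tab a) [] := by
  rw [List.range_eq_range', altB tab a tab.length 0 (0,0,false,0)]
  rw [← List.range_eq_range', proj_map_range]
  simp [Rc]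

theorem foldl_add_map (L : List Nat) (f : Nat → Int) :
    ∀ s : Int, L.foldl (fun t x => t + f x) s = s + (L.map f).sum := by
  induction L with
  | nil => intro s; simp
  | cons x t ih => intro s; simp [ih]; ring

theorem arriba_eq_sum (tab : List (List Int)) (hPre : ∀ r ∈ tab, tab.length ≤ r.length) :
    arriba tab = ((List.range tab.length).map (fun a => Rc (proj tab a) [])).sum := by
  have h := outer_loop tab.length tab (List.range tab.length) tab 0
    ⟨rfl, hPre⟩ (List.nodup_range) (fun a ha => List.mem_range.mp ha)
    (fun a _ => rfl)
  rw [arriba]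
  have hfun : (fun (s : List (List Int) × Int) a =>
      let r := (List.range (tab.length - 1)).foldl
        (fun s2 _ => (List.range' 1 (tab.length - 1)).foldl (stepA a) s2)
        (s.1, ([] : List Nat), s.2)
      (r.1, r.2.2)) = (fun (s : List (List Int) × Int) a =>
      ((((List.range (tab.length - 1)).foldl
          (fun s2 _ => (List.range' 1 (tab.length - 1)).foldl (stepA a) s2)
          (s.1, ([] : List Nat), s.2))).1,
       (((List.range (tab.length - 1)).foldl
          (fun s2 _ => (List.range' 1 (tab.length - 1)).foldl (stepA a) s2)
          (s.1, ([] : List Nat), s.2))).2.2)) := rfl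
  rw [hfun, h]
  simp

theorem arriba_alt_eq_sum (tab : List (List Int)) :
    arriba_alt tab = ((List.range tab.length).map (fun a => Rc (proj tab a) [])).sum := by
  rw [arriba_alt, foldl_add_map]
  rw [List.map_congr_left (fun a _ => alt_col_eq tab a)]
  simp

theorem main_eq_final (tab : List (List Int)) (hPre : Pre_arriba tab) :
    arriba tab = arriba_alt tab := by
  rw [arriba_eq_sum tab hPre, arriba_alt_eq_sum tab]

-- ===== VERDICT (by name: the statement is the Claim_ definition above) =====
theorem arriba_spec : Claim_equal_arriba := by
  intro tab _ hPre
  exact main_eq_final tab hPre
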